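-- pv_equiv track=rewrite | github.com/learnwithparam/monkey-kata | api/demos/legal_contract_analyzer/legal_agentic_rag.py | _parse_risk_response
-- ===== SOURCE A (Python) =====
-- from typing import Dict, List, Any, Optional, TypedDict
--
-- def _parse_risk_response(response: str) -> List[Dict[str, Any]]:
--     """Parse risk analysis response"""
--     risks = []
--     lines = response.split('\n')
--
--     current_risk = {}
--     for line in lines:
--         line = line.strip()
--         if line.startswith('RISK_LEVEL:'):
--             if current_risk:
--                 risks.append(current_risk)
--             current_risk = {'risk_level': line.split(':', 1)[1].strip().lower()}
--         elif line.startswith('CATEGORY:'):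
--             current_risk['category'] = line.split(':', 1)[1].strip()
--         elif line.startswith('DESCRIPTION:'):
--             current_risk['description'] = line.split(':', 1)[1].strip()
--         elif line.startswith('CLAUSE:'):
--             current_risk['clause'] = line.split(':', 1)[1].strip()
--         elif line.startswith('RECOMMENDATION:'):
--             current_risk['recommendation'] = line.split(':', 1)[1].strip()
--
--     if current_risk:
--         risks.append(current_risk)
--
--     return risks
-- ===== SOURCE B (Python) =====
-- _KEYMAP = [('RISK_LEVEL:', 'risk_level'), ('CATEGORY:', 'category'),
--            ('DESCRIPTION:', 'description'), ('CLAUSE:', 'clause'),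
--            ('RECOMMENDATION:', 'recommendation')]
--
-- def _parse_risk_response(response: str):
--     """Two-phase: split into RISK_LEVEL-delimited segments, then build each dict table-driven."""
--     lines = [ln.strip() for ln in response.split('\n')]
--     segments = []
--     current = []
--     for ln in lines:
--         if ln.startswith('RISK_LEVEL:'):
--             segments.append(current)
--             current = [ln]
--         else:
--             current.append(ln)
--     segments.append(current)
--
--     risks = []
--     for seg in segments:
--         d = {}
--         for ln in seg:
--             for prefix, key in _KEYMAP:
--                 if ln.startswith(prefix):
--                     val = ln.split(':', 1)[1].strip()
--                     d[key] = val.lower() if key == 'risk_level' else val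
--                     break
--         if d:
--             risks.append(d)
--     return risks
-- ===== Notes on version B (the rewrite author's own statement) =====
-- stated objective: alternative
-- what changed: Replaces the single stateful pass with an elif prefix chain by a two-phase decomposition: first partition the stripped lines into RISK_LEVEL-delimited segments, then build each risk dict from its segment with a table-driven prefix lookup, keeping only non-empty dicts.
import Mathlib
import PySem

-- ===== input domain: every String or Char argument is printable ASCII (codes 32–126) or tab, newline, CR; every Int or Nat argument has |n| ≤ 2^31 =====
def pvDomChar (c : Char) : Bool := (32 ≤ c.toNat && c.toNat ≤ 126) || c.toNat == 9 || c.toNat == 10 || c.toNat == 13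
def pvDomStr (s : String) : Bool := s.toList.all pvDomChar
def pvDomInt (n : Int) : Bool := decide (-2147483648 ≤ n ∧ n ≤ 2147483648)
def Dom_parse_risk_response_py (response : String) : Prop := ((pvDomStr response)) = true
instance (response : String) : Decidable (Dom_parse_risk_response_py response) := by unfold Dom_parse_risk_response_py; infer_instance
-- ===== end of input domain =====

-- B: two-phase re-decomposition (segment split, then table-driven dict build) of A's one-pass elif parser; same cost, equal return value.

-- line.split(':', 1)[1].strip(); in both programs only applied to lines starting with a prefix
-- containing ':', so index 1 always exists (the getD defaults are unreachable there)
def pvTail (line : String) : String :=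
  PySem.Str.strip (((PySem.Str.splitMax? line ":" 1).getD []).getD 1 "")

-- ===== PORT A =====
def pvStepA (st : List (PySem.Dict String String) × PySem.Dict String String) (raw : String) :
    List (PySem.Dict String String) × PySem.Dict String String :=
  let line := PySem.Str.strip raw
  if PySem.Str.startswith line "RISK_LEVEL:" then
    ((if st.2.size ≠ 0 then st.1 ++ [st.2] else st.1),
     PySem.Dict.empty.insert "risk_level" (PySem.Str.lower (pvTail line)))
  else if PySem.Str.startswith line "CATEGORY:" then (st.1, st.2.insert "category" (pvTail line))
  else if PySem.Str.startswith line "DESCRIPTION:" then (st.1, st.2.insert "description" (pvTail line))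
  else if PySem.Str.startswith line "CLAUSE:" then (st.1, st.2.insert "clause" (pvTail line))
  else if PySem.Str.startswith line "RECOMMENDATION:" then (st.1, st.2.insert "recommendation" (pvTail line))
  else st

def parse_risk_response_py (response : String) : List (List (String × String)) :=
  let lines := (PySem.Str.split? response "\n").getD []
  let st := lines.foldl pvStepA ([], PySem.Dict.empty)
  let risks := if st.2.size ≠ 0 then st.1 ++ [st.2] else st.1
  risks.map (·.items)

-- ===== PORT B =====
def pvKeymap : List (String × String) :=
  [("RISK_LEVEL:", "risk_level"), ("CATEGORY:", "category"), ("DESCRIPTION:", "description"),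
   ("CLAUSE:", "clause"), ("RECOMMENDATION:", "recommendation")]

def pvAssignB (d : PySem.Dict String String) (ln : String) : PySem.Dict String String :=
  match pvKeymap.find? (fun pk => PySem.Str.startswith ln pk.1) with
  | some (_, key) =>
      let v := pvTail ln
      d.insert key (if key == "risk_level" then PySem.Str.lower v else v)
  | none => d

def pvDictOf (seg : List String) : PySem.Dict String String :=
  seg.foldl pvAssignB PySem.Dict.empty

def pvSegStep (st : List (List String) × List String) (ln : String) :
    List (List String) × List String :=
  if PySem.Str.startswith ln "RISK_LEVEL:" then (st.1 ++ [st.2], [ln]) else (st.1, st.2 ++ [ln])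

def parse_risk_response_py_alt (response : String) : List (List (String × String)) :=
  let lines := ((PySem.Str.split? response "\n").getD []).map PySem.Str.strip
  let st := lines.foldl pvSegStep ([], [])
  let segments := st.1 ++ [st.2]
  segments.foldl (fun acc seg =>
    let d := pvDictOf seg
    if d.size ≠ 0 then acc ++ [d.items] else acc) []

-- ===== PRECONDITION & SPEC =====
def Spec_parse_risk_response_py (response : String) (out : List (List (String × String))) : Prop := out = parse_risk_response_py_alt response
instance (response : String) (out : List (List (String × String))) : Decidable (Spec_parse_risk_response_py response out) := by unfold Spec_parse_risk_response_py; infer_instance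

-- ===== CLAIM (what is proved, stated in full; the proofs are below) =====
def Claim_equal_parse_risk_response_py : Prop := ∀ (response : String), Dom_parse_risk_response_py response → Spec_parse_risk_response_py response (parse_risk_response_py response)

-- ===== LEMMAS AND PROOFS =====

-- what each accumulated dict contributes to the output
def pvEmit (d : PySem.Dict String String) : List (List (String × String)) :=
  if d.size ≠ 0 then [d.items] else []

-- reference recursion: process stripped lines threading the current dict
def pvRun : List String → PySem.Dict String String → List (List (String × String))
  | [], cur => pvEmit cur
  | l :: ls, cur =>
    if PySem.Str.startswith l "RISK_LEVEL:" then
      pvEmit cur ++ pvRun ls (PySem.Dict.empty.insert "risk_level" (PySem.Str.lower (pvTail l)))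
    else pvRun ls (pvAssignB cur l)

theorem pvRun_nil (cur : PySem.Dict String String) : pvRun [] cur = pvEmit cur := rfl

theorem pvRun_cons (l : String) (ls : List String) (cur : PySem.Dict String String) :
    pvRun (l :: ls) cur =
      (if PySem.Str.startswith l "RISK_LEVEL:" then
        pvEmit cur ++ pvRun ls (PySem.Dict.empty.insert "risk_level" (PySem.Str.lower (pvTail l)))
      else pvRun ls (pvAssignB cur l)) := rfl

theorem pvAssignB_marker (d : PySem.Dict String String) (l : String)
    (h : PySem.Str.startswith l "RISK_LEVEL:" = true) :
    pvAssignB d l = d.insert "risk_level" (PySem.Str.lower (pvTail l)) := by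
  simp only [pvAssignB, pvKeymap, List.find?, h]
  rfl

theorem pvStepA_nonmarker (st : List (PySem.Dict String String) × PySem.Dict String String)
    (raw : String) (h : PySem.Str.startswith (PySem.Str.strip raw) "RISK_LEVEL:" = false) :
    pvStepA st raw = (st.1, pvAssignB st.2 (PySem.Str.strip raw)) := by
  simp only [pvStepA, pvAssignB, pvKeymap, List.find?, h]
  cases PySem.Str.startswith (PySem.Str.strip raw) "CATEGORY:" <;>
    cases PySem.Str.startswith (PySem.Str.strip raw) "DESCRIPTION:" <;>
      cases PySem.Str.startswith (PySem.Str.strip raw) "CLAUSE:" <;>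
        cases PySem.Str.startswith (PySem.Str.strip raw) "RECOMMENDATION:" <;> rfl

-- A's whole loop, from any state, computes pvRun of the stripped lines
theorem pvLemA (ls : List String) (risks : List (PySem.Dict String String))
    (cur : PySem.Dict String String) :
    (let st := ls.foldl pvStepA (risks, cur)
     (if st.2.size ≠ 0 then st.1 ++ [st.2] else st.1).map (·.items))
      = risks.map (·.items) ++ pvRun (ls.map PySem.Str.strip) cur := by
  induction ls generalizing risks cur with
  | nil => simp only [List.foldl, List.map, pvRun_nil, pvEmit]; split_ifs <;> simp
  | cons l ls ih =>
    rw [List.foldl_cons, List.map_cons, pvRun_cons]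
    by_cases h : PySem.Str.startswith (PySem.Str.strip l) "RISK_LEVEL:" = true
    · rw [if_pos h]
      have hstep : pvStepA (risks, cur) l =
          ((if cur.size ≠ 0 then risks ++ [cur] else risks),
           PySem.Dict.empty.insert "risk_level" (PySem.Str.lower (pvTail (PySem.Str.strip l)))) := by
        simp only [pvStepA, h, reduceIte]
      rw [hstep, ih]
      simp only [pvEmit]
      split_ifs <;> simp
    · rw [if_neg h, pvStepA_nonmarker _ _ (by simpa using h)]
      exact ih _ _

theorem pvDictOf_append (seg : List String) (l : String) :
    pvDictOf (seg ++ [l]) = pvAssignB (pvDictOf seg) l := by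
  simp [pvDictOf, List.foldl_append]

-- B's segment fold plus flush, from any state, also computes pvRun
theorem pvLemB (ls : List String) (done : List (List String)) (curseg : List String) :
    (let st := ls.foldl pvSegStep (done, curseg)
     (st.1 ++ [st.2]).foldl (fun acc seg =>
        let d := pvDictOf seg
        if d.size ≠ 0 then acc ++ [d.items] else acc) [])
      = (done.foldl (fun acc seg =>
          let d := pvDictOf seg
          if d.size ≠ 0 then acc ++ [d.items] else acc) []) ++ pvRun ls (pvDictOf curseg) := by
  induction ls generalizing done curseg with
  | nil =>
    simp only [List.foldl, pvRun_nil, pvEmit, List.foldl_append]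
    split_ifs <;> simp
  | cons l ls ih =>
    rw [List.foldl_cons, pvRun_cons]
    by_cases h : PySem.Str.startswith l "RISK_LEVEL:" = true
    · rw [show pvSegStep (done, curseg) l = (done ++ [curseg], [l]) by
          simp only [pvSegStep, h, reduceIte],
        if_pos h, ih]
      have hd : pvDictOf [l] =
          PySem.Dict.empty.insert "risk_level" (PySem.Str.lower (pvTail l)) := by
        simp only [pvDictOf, List.foldl, pvAssignB_marker _ _ h]
      rw [hd]
      simp only [List.foldl_append, List.foldl, pvEmit]
      split_ifs <;> simp
    · rw [show pvSegStep (done, curseg) l = (done, curseg ++ [l]) by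
          simp only [Bool.not_eq_true] at h; simp only [pvSegStep, h]; rfl,
        if_neg h, ih, pvDictOf_append]

-- ===== VERDICT (by name: the statement is the Claim_ definition above) =====
theorem parse_risk_response_py_spec : Claim_equal_parse_risk_response_py := by
  intro response _
  unfold Spec_parse_risk_response_py parse_risk_response_py parse_risk_response_py_alt
  rw [pvLemA, pvLemB]
  simp [pvDictOf]
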